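-- pv_equiv track=rewrite | github.com/kleffy/foobar | challenge_2b/solution.py | solution
-- ===== SOURCE A (Python) =====
-- import functools
--
-- def solution(l):
--     def split_version(version):
--         return [int(x) for x in version.split('.')]
--
--     def compare_versions(version1, version2):
--         v1_split = split_version(version1)
--         v2_split = split_version(version2)
--         v1_len, v2_len = len(v1_split), len(v2_split)
--
--         for i in range(max(v1_len, v2_len)):
--             v1 = v1_split[i] if i < v1_len else 0
--             v2 = v2_split[i] if i < v2_len else 0
--             if v1 != v2:
--                 return v1 - v2
--         return v1_len - v2_len
--
--     return sorted(l, key=functools.cmp_to_key(compare_versions))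
-- ===== SOURCE B (Python) =====
-- def solution(l):
--     # stable selection sort: repeatedly move the first remaining version with the
--     # smallest integer-component tuple to the output (parses only while comparing)
--     rest = list(l)
--     out = []
--     while rest:
--         m = 0
--         for i in range(1, len(rest)):
--             if tuple(int(x) for x in rest[i].split('.')) < tuple(int(x) for x in rest[m].split('.')):
--                 m = i
--         out.append(rest.pop(m))
--     return out
-- ===== Notes on version B (the rewrite author's own statement) =====
-- stated objective: alternative
-- what changed: Replaces sorted() with a cmp_to_key padded pairwise comparator by an explicit stable selection sort that repeatedly moves out the first remaining version with the smallest integer-component tuple, compared lexicographically.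
-- outside the precondition, e.g. on solution(['1', '1.-1']): A returns ['1.-1', '1'], B returns ['1', '1.-1']
import Mathlib
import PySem

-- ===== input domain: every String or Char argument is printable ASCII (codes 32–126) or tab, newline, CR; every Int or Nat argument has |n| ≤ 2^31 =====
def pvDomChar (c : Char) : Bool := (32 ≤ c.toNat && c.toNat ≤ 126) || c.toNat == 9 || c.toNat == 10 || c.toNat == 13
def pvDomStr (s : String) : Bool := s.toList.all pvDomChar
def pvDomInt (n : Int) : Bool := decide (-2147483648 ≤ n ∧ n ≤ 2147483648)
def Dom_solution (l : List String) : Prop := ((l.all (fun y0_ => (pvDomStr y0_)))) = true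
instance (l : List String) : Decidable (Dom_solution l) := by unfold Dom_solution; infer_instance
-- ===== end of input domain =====

-- B replaces A's cmp_to_key comparator sort by an explicit stable selection sort on
-- integer-component tuples (alternative algorithm, same return value on Pre_).


-- ===== PORT A =====
-- split_version: '.' is a nonempty separator so split? never returns none (getD [] is dead);
-- int(x) raising ValueError is excluded by Pre_, so getD 0 is dead wherever the claim speaks
def splitVersionA (v : String) : List Int :=
  ((PySem.Str.split? v ".").getD []).map (fun x => (PySem.Int.ofStr? x).getD 0)

-- the comparator's loop over range(max(len,len)) with 0-padding and the final length
-- tie-break, as structural recursion on the two component lists carrying the tie-break value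
def cmpPad : List Int → List Int → Int → Int
  | [], [], d => d
  | x :: xs, [], d => if x ≠ 0 then x - 0 else cmpPad xs [] d
  | [], y :: ys, d => if 0 ≠ y then 0 - y else cmpPad [] ys d
  | x :: xs, y :: ys, d => if x ≠ y then x - y else cmpPad xs ys d

def compareVersions (a b : String) : Int :=
  let v1 := splitVersionA a
  let v2 := splitVersionA b
  cmpPad v1 v2 ((v1.length : Int) - (v2.length : Int))

-- sorted(l, key=functools.cmp_to_key(compare_versions)): Python's stable sort driven by the
-- comparator, as the stable insertion sort PySem.List.sorted itself reduces to
def solution (l : List String) : List String :=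
  l.foldl (fun acc x =>
    PySem.List.insertBy (fun a b => decide (compareVersions a b < 0)) x acc) []

-- ===== PORT B =====
-- tuple(int(x) for x in v.split('.')) — the integer-component tuple of a version string
def versionKey (v : String) : List Int :=
  ((PySem.Str.split? v ".").getD []).map (fun x => (PySem.Int.ofStr? x).getD 0)

-- for i in range(1, len(rest)): if key(rest[i]) < key(rest[m]): m = i   (rest[·] is always
-- in range here, so the getD "" of the pyGet? IndexError branch is dead)
def selectIdx (rest : List String) : Int :=
  (PySem.List.pyRange 1 (rest.length : Int)).foldl
    (fun m i =>
      if versionKey ((PySem.List.pyGet? rest i).getD "") < versionKey ((PySem.List.pyGet? rest m).getD "")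
      then i else m) 0

-- while rest: … out.append(rest.pop(m)) — fuel (= the initial length) only makes the loop
-- structural; selectIdx is nonnegative and in range, so toNat is exact and fuel never runs out
def selSort : Nat → List String → List String
  | 0, _ => []
  | fuel + 1, rest =>
    if rest.isEmpty then []
    else
      let m := selectIdx rest
      ((PySem.List.pyGet? rest m).getD "") :: selSort fuel (rest.eraseIdx m.toNat)

def solution_alt (l : List String) : List String := selSort l.length l

-- ===== PRECONDITION & SPEC =====
-- Pre_ admits every list of length ≤ 1 (no comparison ever runs) and otherwise requires each
-- dotted component to parse as a NONNEGATIVE int: a non-parsing component makes int() raise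
-- ValueError in both programs once a comparison runs, and negative components are outside the
-- natural domain of version strings — there A's padded comparator and B's tuple order, both
-- defensible, disagree on the length tie-break.
def Pre_solution (l : List String) : Prop :=
  l.length ≤ 1 ∨ ∀ v ∈ l, ∀ x ∈ (PySem.Str.split? v ".").getD [],
    ((PySem.Int.ofStr? x).any (fun n => decide (0 ≤ n))) = true
instance (l : List String) : Decidable (Pre_solution l) := by unfold Pre_solution; infer_instance

def pvWitness_solution : List String := ["1.10", "1.2", "3", "1.2.0", "0.9"]

def Spec_solution (l : List String) (out : List String) : Prop := out = solution_alt l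
instance (l : List String) (out : List String) : Decidable (Spec_solution l out) := by unfold Spec_solution; infer_instance

-- ===== CLAIM (what is proved, stated in full; the proofs are below) =====
def Claim_equal_solution : Prop := ∀ (l : List String), Dom_solution l → Pre_solution l → Spec_solution l (solution l)

-- ===== LEMMAS AND PROOFS =====

-- every dotted component of v parses to a nonnegative int (Pre_'s element-wise condition)
def GoodV (v : String) : Prop :=
  ∀ x ∈ (PySem.Str.split? v ".").getD [],
    ((PySem.Int.ofStr? x).any (fun n => decide (0 ≤ n))) = true

theorem goodV_nonneg (v : String) (h : GoodV v) : ∀ a ∈ versionKey v, 0 ≤ a := by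
  intro a ha
  simp only [versionKey, List.mem_map] at ha
  obtain ⟨x, hx, rfl⟩ := ha
  have := h x hx
  cases hofs : PySem.Int.ofStr? x with
  | none => simp [hofs, Option.any] at this
  | some n => simp [hofs, Option.any] at this ⊢; exact this

theorem cmpPad_nil_left (ys : List Int) (d : Int) (hys : ∀ a ∈ ys, 0 ≤ a) (hd : d < 0) :
    cmpPad [] ys d < 0 := by
  induction ys with
  | nil => simp [cmpPad]; omega
  | cons y ys ih =>
    have hy : 0 ≤ y := hys y (by simp)
    by_cases h0 : (0 : Int) = y
    · simpa [cmpPad, h0] using ih (fun a ha => hys a (by simp [ha]))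
    · simp only [cmpPad, if_pos h0]
      omega

theorem cmpPad_nil_right (xs : List Int) (d : Int) (hxs : ∀ a ∈ xs, 0 ≤ a) (hd : 0 < d) :
    ¬ cmpPad xs [] d < 0 := by
  induction xs with
  | nil => simp [cmpPad]; omega
  | cons x xs ih =>
    have hx : 0 ≤ x := hxs x (by simp)
    by_cases h0 : x = 0
    · simpa [cmpPad, h0] using ih (fun a ha => hxs a (by simp [ha]))
    · simp only [cmpPad, if_pos h0]
      omega

-- the heart of the A side: on nonnegative component lists the padded comparator's sign is
-- the lexicographic (shorter-prefix-first) order on the component lists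
theorem cmpPad_lt_iff (xs : List Int) : ∀ (ys : List Int),
    (∀ a ∈ xs, 0 ≤ a) → (∀ a ∈ ys, 0 ≤ a) →
    (cmpPad xs ys ((xs.length : Int) - (ys.length : Int)) < 0 ↔ xs < ys) := by
  induction xs with
  | nil =>
    intro ys _ hys
    cases ys with
    | nil => simp [cmpPad]
    | cons y ys =>
      have hlt : cmpPad [] (y :: ys) ((List.length ([] : List Int) : Int) - ((y :: ys).length : Int)) < 0 :=
        cmpPad_nil_left _ _ hys (by simp; omega)
      simp only [hlt, true_iff]
      exact List.nil_lt_cons y ys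
  | cons x xs ih =>
    intro ys hxs hys
    cases ys with
    | nil =>
      have hn : ¬ cmpPad (x :: xs) [] (((x :: xs).length : Int) - (List.length ([] : List Int) : Int)) < 0 :=
        cmpPad_nil_right _ _ hxs (by simp)
      simp only [hn, false_iff]
      exact List.not_lt_nil _
    | cons y ys =>
      rw [List.cons_lt_cons_iff]
      by_cases hxy : x = y
      · subst hxy
        have : cmpPad (x :: xs) (x :: ys) (((x :: xs).length : Int) - ((x :: ys).length : Int))
            = cmpPad xs ys ((xs.length : Int) - (ys.length : Int)) := by
          simp [cmpPad]
        rw [this, ih ys (fun a ha => hxs a (by simp [ha])) (fun a ha => hys a (by simp [ha]))]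
        simp
      · simp only [cmpPad, if_pos hxy]
        constructor
        · intro h; left; omega
        · rintro (h | ⟨rfl, _⟩)
          · omega
          · exact absurd rfl hxy

theorem insertBy_congr {α : Type} (f g : α → α → Bool) (P : α → Prop)
    (hfg : ∀ a b, P a → P b → f a b = g a b) (x : α) (acc : List α)
    (hx : P x) (hacc : ∀ a ∈ acc, P a) :
    PySem.List.insertBy f x acc = PySem.List.insertBy g x acc := by
  induction acc with
  | nil => rfl
  | cons y ys ih =>
    have hy : P y := hacc y (by simp)
    simp only [PySem.List.insertBy, hfg x y hx hy]
    by_cases h : g x y = true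
    · simp [h]
    · simp [h, ih (fun a ha => hacc a (by simp [ha]))]

theorem foldl_insertBy_congr {α : Type} (f g : α → α → Bool) (P : α → Prop)
    (hfg : ∀ a b, P a → P b → f a b = g a b) :
    ∀ (xs acc : List α), (∀ a ∈ xs, P a) → (∀ a ∈ acc, P a) →
    xs.foldl (fun acc x => PySem.List.insertBy f x acc) acc
      = xs.foldl (fun acc x => PySem.List.insertBy g x acc) acc := by
  intro xs
  induction xs with
  | nil => intros; rfl
  | cons x xs ih =>
    intro acc hxs hacc
    have hx : P x := hxs x (by simp)
    simp only [List.foldl_cons]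
    rw [insertBy_congr f g P hfg x acc hx hacc]
    exact ih _ (fun a ha => hxs a (by simp [ha]))
      (fun a ha => ((PySem.List.mem_insertBy g x a acc).mp ha).elim
        (fun h => h ▸ hx) (fun h => hacc a h))

-- ---- B side: the stable selection sort equals PySem's stable insertion sort ----

-- key of the element at index j (the form the B port reads it in)
def gk (l : List String) (j : Nat) : List Int := versionKey ((l[j]?).getD "")

def VKSorted (ys : List String) : Prop := ys.Pairwise (fun a b => versionKey a ≤ versionKey b)

theorem insertBy_pairwise (x : String) (acc : List String) (h : VKSorted acc) :
    VKSorted (PySem.List.insertBy (fun a b => decide (versionKey a < versionKey b)) x acc) := by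
  induction acc with
  | nil => simp [PySem.List.insertBy, VKSorted]
  | cons y ys ih =>
    have hy : ∀ z ∈ ys, versionKey y ≤ versionKey z := by
      intro z hz; exact (List.pairwise_cons.mp h).1 z hz
    have htl : VKSorted ys := (List.pairwise_cons.mp h).2
    by_cases hc : versionKey x < versionKey y
    · simp only [PySem.List.insertBy, hc, decide_true, if_true]
      refine List.pairwise_cons.mpr ⟨?_, h⟩
      intro z hz
      rcases List.mem_cons.mp hz with rfl | hz'
      · exact le_of_lt hc
      · exact le_of_lt (lt_of_lt_of_le hc (hy z hz'))
    · simp only [PySem.List.insertBy, hc, decide_false, Bool.false_eq_true, if_false]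
      refine List.pairwise_cons.mpr ⟨?_, ih htl⟩
      intro z hz
      rcases (PySem.List.mem_insertBy _ _ _ _).mp hz with rfl | hz'
      · exact le_of_not_gt hc
      · exact hy z hz'

theorem filter_insertBy (k : List Int) (x : String) (acc : List String) (h : VKSorted acc) :
    (PySem.List.insertBy (fun a b => decide (versionKey a < versionKey b)) x acc).filter
        (fun a => decide (versionKey a = k))
      = acc.filter (fun a => decide (versionKey a = k))
        ++ if versionKey x = k then [x] else [] := by
  induction acc with
  | nil =>
    by_cases hx : versionKey x = k <;> simp [PySem.List.insertBy, List.filter, hx]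
  | cons y ys ih =>
    have hy : ∀ z ∈ ys, versionKey y ≤ versionKey z := by
      intro z hz; exact (List.pairwise_cons.mp h).1 z hz
    have htl : VKSorted ys := (List.pairwise_cons.mp h).2
    by_cases hc : versionKey x < versionKey y
    · -- x goes in front: nothing at or after y can have key k when versionKey x = k
      simp only [PySem.List.insertBy, hc, decide_true, if_true]
      by_cases hx : versionKey x = k
      · have hnil : (y :: ys).filter (fun a => decide (versionKey a = k)) = [] := by
          rw [List.filter_eq_nil_iff]
          intro z hz
          have hzgt : versionKey x < versionKey z := by
            rcases List.mem_cons.mp hz with rfl | hz'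
            · exact hc
            · exact lt_of_lt_of_le hc (hy z hz')
          simp only [decide_eq_true_eq]
          intro hk
          rw [← hx] at hk
          exact absurd (hk ▸ hzgt) (lt_irrefl _)
        simp [hx, hnil]
      · simp [List.filter_cons, hx]
    · simp only [PySem.List.insertBy, hc, decide_false, Bool.false_eq_true, if_false]
      by_cases hyk : versionKey y = k
      · simp [hyk, ih htl]
      · simp [hyk, ih htl]

theorem sorted_VKSorted (l : List String) : VKSorted (PySem.List.sorted l versionKey) := by
  unfold VKSorted
  have e : PySem.List.sorted l versionKey
      = @PySem.List.sorted String (List Int) List.instLinearOrder.toLT LinearOrder.toDecidableLT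
          l versionKey false := by congr 1
  rw [e]
  exact PySem.List.sorted_pairwise l versionKey

theorem filter_foldl (k : List Int) : ∀ (xs acc : List String), VKSorted acc →
    (xs.foldl (fun acc x =>
        PySem.List.insertBy (fun a b => decide (versionKey a < versionKey b)) x acc) acc).filter
      (fun a => decide (versionKey a = k))
    = acc.filter (fun a => decide (versionKey a = k))
      ++ xs.filter (fun a => decide (versionKey a = k)) := by
  intro xs
  induction xs with
  | nil => simp
  | cons x xs ih =>
    intro acc hacc
    simp only [List.foldl_cons]
    rw [ih _ (insertBy_pairwise x acc hacc), filter_insertBy k x acc hacc]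
    by_cases hx : versionKey x = k <;>
      simp [hx, List.append_assoc]

theorem filter_sorted (l : List String) (k : List Int) :
    (PySem.List.sorted l versionKey).filter (fun a => decide (versionKey a = k))
      = l.filter (fun a => decide (versionKey a = k)) := by
  rw [PySem.List.sorted_eq_foldl_insertBy]
  simpa using filter_foldl k l [] (by simp [VKSorted])

theorem stable_unique : ∀ (ys zs : List String), VKSorted ys → VKSorted zs →
    (∀ k, ys.filter (fun a => decide (versionKey a = k))
        = zs.filter (fun a => decide (versionKey a = k))) → ys = zs := by
  intro ys
  induction ys with
  | nil =>
    intro zs _ _ hf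
    cases zs with
    | nil => rfl
    | cons z zs' =>
      have := hf (versionKey z)
      simp at this
  | cons y ys' ih =>
    intro zs hys hzs hf
    cases zs with
    | nil =>
      have := hf (versionKey y)
      simp at this
    | cons z zs' =>
      have hy2 : ∀ b ∈ ys', versionKey y ≤ versionKey b := (List.pairwise_cons.mp hys).1
      have hz2 : ∀ b ∈ zs', versionKey z ≤ versionKey b := (List.pairwise_cons.mp hzs).1
      have h1 : versionKey y ≤ versionKey z := by
        have hne : ((y :: ys').filter (fun a => decide (versionKey a = versionKey z))) ≠ [] := by
          rw [hf]; simp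
        obtain ⟨a, haMem, haP⟩ : ∃ a ∈ y :: ys', versionKey a = versionKey z := by
          by_contra hc
          push Not at hc
          exact hne (List.filter_eq_nil_iff.mpr (by simpa using hc))
        rcases List.mem_cons.mp haMem with rfl | ha'
        · exact le_of_eq haP
        · exact haP ▸ hy2 a ha'
      have h2 : versionKey z ≤ versionKey y := by
        have hne : ((z :: zs').filter (fun a => decide (versionKey a = versionKey y))) ≠ [] := by
          rw [← hf]; simp
        obtain ⟨a, haMem, haP⟩ : ∃ a ∈ z :: zs', versionKey a = versionKey y := by
          by_contra hc
          push Not at hc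
          exact hne (List.filter_eq_nil_iff.mpr (by simpa using hc))
        rcases List.mem_cons.mp haMem with rfl | ha'
        · exact le_of_eq haP
        · exact haP ▸ hz2 a ha'
      have hyz : versionKey y = versionKey z := le_antisymm h1 h2
      have hhead := hf (versionKey y)
      simp [hyz] at hhead
      obtain ⟨rfl, htail⟩ := hhead
      have hf' : ∀ k, ys'.filter (fun a => decide (versionKey a = k))
          = zs'.filter (fun a => decide (versionKey a = k)) := by
        intro k
        by_cases hk : versionKey y = k
        · rw [← hk]; exact htail
        · have := hf k
          simpa [hk] using this
      rw [ih zs' (List.pairwise_cons.mp hys).2 (List.pairwise_cons.mp hzs).2 hf']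

theorem filter_decomp : ∀ (l : List String) (m : Nat), m < l.length →
    (∀ j, j < m → gk l j ≠ gk l m) → ∀ k,
    l.filter (fun a => decide (versionKey a = k))
      = (if gk l m = k then [(l[m]?).getD ""] else [])
        ++ (l.eraseIdx m).filter (fun a => decide (versionKey a = k)) := by
  intro l
  induction l with
  | nil => intro m hm; simp at hm
  | cons x xs ih =>
    intro m hm hfirst k
    cases m with
    | zero =>
      by_cases hx : versionKey x = k <;> simp [hx, gk]
    | succ m' =>
      have hx_ne : versionKey x ≠ gk (x :: xs) (m' + 1) := by
        simpa [gk] using hfirst 0 (Nat.succ_pos m')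
      have hgk : gk (x :: xs) (m' + 1) = gk xs m' := by simp [gk]
      have hih := ih m' (by simpa using hm)
        (fun j hj => by simpa [gk] using hfirst (j + 1) (by omega)) k
      by_cases hx : versionKey x = k
      · have hne : ¬ (gk xs m' = k) := fun hc => hx_ne (by rw [hgk, hc, hx])
        simp [hx, hih, hne, hgk]
      · simp [hx, hih, hgk]

theorem sorted_cons_min (l : List String) (m : Nat) (hm : m < l.length)
    (hmin : ∀ z ∈ l, gk l m ≤ versionKey z)
    (hfirst : ∀ j, j < m → gk l m < gk l j) :
    PySem.List.sorted l versionKey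
      = (l[m]?).getD "" :: PySem.List.sorted (l.eraseIdx m) versionKey := by
  apply stable_unique
  · exact sorted_VKSorted l
  · refine List.pairwise_cons.mpr ⟨?_, sorted_VKSorted (l.eraseIdx m)⟩
    intro b hb
    exact hmin b (List.mem_of_mem_eraseIdx ((PySem.List.mem_sorted _ _ _ _).mp hb))
  · intro k
    rw [filter_sorted, filter_decomp l m hm (fun j hj => ne_of_gt (hfirst j hj)) k,
      List.filter_cons, filter_sorted]
    by_cases hk : gk l m = k
    · have : versionKey ((l[m]?).getD "") = k := hk
      simp [hk, this]
    · have : ¬ versionKey ((l[m]?).getD "") = k := hk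
      simp [hk, this]

theorem selLoop_spec (l : List String) :
    ∀ t : Nat, 1 ≤ t → t ≤ l.length →
    ∃ m : Nat,
      ((PySem.List.pyRange 1 (t : Int)).foldl
        (fun m i =>
          if versionKey ((PySem.List.pyGet? l i).getD "")
              < versionKey ((PySem.List.pyGet? l m).getD "")
          then i else m) 0 = (m : Int)) ∧
      m < t ∧ (∀ j, j < t → gk l m ≤ gk l j) ∧ (∀ j, j < m → gk l m < gk l j) := by
  intro t
  induction t with
  | zero => intro h1 _; exact absurd h1 (by omega)
  | succ t ih =>
    intro _ h2
    by_cases ht : t = 0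
    · subst ht
      refine ⟨0, ?_, by omega, ?_, by omega⟩
      · show (PySem.List.pyRange 1 ((1 : Nat) : Int)).foldl _ 0 = ((0 : Nat) : Int)
        norm_num [PySem.List.pyRange]
      · intro j hj
        have : j = 0 := by omega
        subst this
        exact le_rfl
    · obtain ⟨m, hfold, hmt, hmin, hfirst⟩ := ih (by omega) (by omega)
      have hsplit : PySem.List.pyRange 1 ((t + 1 : Nat) : Int)
          = PySem.List.pyRange 1 (t : Int) ++ [(t : Int)] := by
        rw [PySem.List.pyRange_one_append 1 (t : Int) ((t + 1 : Nat) : Int)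
            (by omega) (by push_cast; omega)]
        congr 1
        rw [PySem.List.pyRange_one_cons (by push_cast; omega)]
        have : ((t + 1 : Nat) : Int) = (t : Int) + 1 := by push_cast; ring
        rw [← this]
        simp [PySem.List.pyRange]
      rw [hsplit, List.foldl_append, hfold]
      simp only [List.foldl_cons, List.foldl_nil]
      rw [PySem.List.pyGet?_natCast l t, PySem.List.pyGet?_natCast l m]
      have e1 : versionKey (l[t]?.getD "") = gk l t := rfl
      have e2 : versionKey (l[m]?.getD "") = gk l m := rfl
      rw [e1, e2]
      by_cases hlt : gk l t < gk l m
      · rw [if_pos hlt]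
        refine ⟨t, rfl, by omega, ?_, ?_⟩
        · intro j hj
          rcases Nat.lt_succ_iff_lt_or_eq.mp hj with hj' | rfl
          · exact le_of_lt (lt_of_lt_of_le hlt (hmin j hj'))
          · exact le_rfl
        · intro j hj
          exact lt_of_lt_of_le hlt (hmin j hj)
      · rw [if_neg hlt]
        refine ⟨m, rfl, by omega, ?_, hfirst⟩
        intro j hj
        rcases Nat.lt_succ_iff_lt_or_eq.mp hj with hj' | rfl
        · exact hmin j hj'
        · exact le_of_not_gt hlt

theorem selectIdx_spec (l : List String) (h : l ≠ []) :
    ∃ m : Nat, selectIdx l = (m : Int) ∧ m < l.length ∧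
      (∀ j : Nat, j < l.length → gk l m ≤ gk l j) ∧
      (∀ j : Nat, j < m → gk l m < gk l j) := by
  have hlen : 1 ≤ l.length := by
    cases l with
    | nil => exact absurd rfl h
    | cons a as => simp
  obtain ⟨m, hfold, hmt, hmin, hfirst⟩ := selLoop_spec l l.length hlen le_rfl
  exact ⟨m, hfold, hmt, hmin, hfirst⟩

theorem selSort_eq_sorted : ∀ (n : Nat) (l : List String), l.length ≤ n →
    selSort n l = PySem.List.sorted l versionKey := by
  intro n
  induction n with
  | zero =>
    intro l hl
    have : l = [] := List.length_eq_zero_iff.mp (by omega)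
    subst this
    rfl
  | succ n ih =>
    intro l hl
    cases l with
    | nil => rfl
    | cons x xs =>
      obtain ⟨m, hsel, hmlen, hmin, hfirst⟩ := selectIdx_spec (x :: xs) (by simp)
      show (if (x :: xs).isEmpty then []
        else
          ((PySem.List.pyGet? (x :: xs) (selectIdx (x :: xs))).getD "")
            :: selSort n ((x :: xs).eraseIdx (selectIdx (x :: xs)).toNat))
        = PySem.List.sorted (x :: xs) versionKey
      rw [List.isEmpty_cons, if_neg (by simp), hsel, Int.toNat_natCast,
        PySem.List.pyGet?_natCast]
      rw [ih _ (by rw [List.length_eraseIdx, if_pos hmlen]; omega)]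
      refine (sorted_cons_min (x :: xs) m hmlen ?_ hfirst).symm
      intro z hz
      obtain ⟨j, hj, rfl⟩ := List.mem_iff_getElem.mp hz
      have : versionKey (x :: xs)[j] = gk (x :: xs) j := by
        simp [gk, List.getElem?_eq_getElem hj]
      rw [this]
      exact hmin j hj

theorem alt_eq_sorted (l : List String) : solution_alt l = PySem.List.sorted l versionKey :=
  selSort_eq_sorted l.length l le_rfl

-- ===== VERDICT (by name: the statement is the Claim_ definition above) =====
theorem solution_spec : Claim_equal_solution := by
  intro l _hdom hpre
  unfold Spec_solution
  rw [alt_eq_sorted]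
  rcases hpre with hlen | hgood
  · match l, hlen with
    | [], _ => rfl
    | [x], _ =>
      rw [PySem.List.sorted_eq_foldl_insertBy]
      rfl
  · rw [PySem.List.sorted_eq_foldl_insertBy]
    unfold solution
    apply foldl_insertBy_congr _ _ GoodV
    · intro a b ha hb
      have hkey : splitVersionA = versionKey := rfl
      have := cmpPad_lt_iff (versionKey a) (versionKey b)
        (goodV_nonneg a ha) (goodV_nonneg b hb)
      simp only [compareVersions, hkey]
      exact decide_eq_decide.mpr this
    · exact hgood
    · intro a ha; cases ha
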